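-- pv_equiv track=rewrite | github.com/MJbae/algorithm | python_advanced/1주차 큐_힙/연습문제_게임아이템.py | solution
-- ===== SOURCE A (Python) =====
-- import heapq
-- from collections import deque
--
-- def solution(healths, items):
--     healths.sort()
--     items = [(*item, idx) for idx, item in enumerate(items, 1)]
--     BUFF, DEBUFF, INDEX = 0, 1, 2
--     items.sort(key=lambda x: x[DEBUFF])
--     items = deque(items)
--
--     candidates = []
--     answer = []
--
--     for health in healths:
--         while items and health - items[0][DEBUFF] >= 100:
--             item = items.popleft()
--             heapq.heappush(candidates, (-item[BUFF], item[INDEX]))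
--         if candidates:
--             answer.append(heapq.heappop(candidates)[1])
--
--     answer.sort()
--     return answer
-- ===== SOURCE B (Python) =====
-- def solution(healths, items):
--     its = sorted([(*item, i) for i, item in enumerate(items, 1)], key=lambda t: t[1])
--     counts = [sum(1 for t in its if t[1] <= h - 100) for h in sorted(healths)]
--     used = [False] * len(its)
--     answer = []
--     for k in counts:
--         best = -1
--         for j in range(k):
--             if used[j]:
--                 continue
--             if best == -1 or its[j][0] > its[best][0] or (its[j][0] == its[best][0] and its[j][2] < its[best][2]):
--                 best = j
--         if best != -1:
--             used[best] = True
--             answer.append(its[best][2])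
--     answer.sort()
--     return answer
-- ===== Notes on version B (the rewrite author's own statement) =====
-- stated objective: alternative
-- what changed: Replaces A's deque+heapq machinery by staged passes: precompute for each sorted health the count of eligible items (a prefix of the debuff-sorted table), then select per health by a linear scan over that prefix for the max-buff (ties: smallest t[2]) not-yet-used entry, marking selections in a boolean used-array instead of mutating any container.
import Mathlib
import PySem

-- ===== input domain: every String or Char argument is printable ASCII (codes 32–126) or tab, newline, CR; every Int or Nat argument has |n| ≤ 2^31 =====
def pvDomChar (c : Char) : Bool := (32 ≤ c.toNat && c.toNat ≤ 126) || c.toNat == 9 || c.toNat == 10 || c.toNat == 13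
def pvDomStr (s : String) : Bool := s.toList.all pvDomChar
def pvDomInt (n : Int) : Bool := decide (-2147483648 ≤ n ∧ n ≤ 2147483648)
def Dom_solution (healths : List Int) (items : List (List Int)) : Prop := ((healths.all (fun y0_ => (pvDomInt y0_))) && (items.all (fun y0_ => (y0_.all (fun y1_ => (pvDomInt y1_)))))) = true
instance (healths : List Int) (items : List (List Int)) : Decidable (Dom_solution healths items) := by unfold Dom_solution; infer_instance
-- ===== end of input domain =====

-- B replaces A's deque + heapq machinery by staged passes: a precomputed eligibility count
-- per sorted health (the eligible items form a prefix of the debuff-sorted table), then a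
-- linear scan of that prefix for the best unused entry, marked in a boolean array; 'alternative'.
-- Python A sorts `healths` in place (B does not); the theorems are about the return value.

-- ===== PORT A =====
-- heapq on 2-tuples is modeled as a min-priority queue kept as a lexicographically
-- sorted list: heappush = ordered insert, heappop = head.  The popped VALUES are
-- exactly heapq's (min of the heap, and equal tuples are indistinguishable).
def heapPush (x : Int × Int) : List (Int × Int) → List (Int × Int)
  | [] => [x]
  | y :: ys => if x.1 < y.1 ∨ (x.1 = y.1 ∧ x.2 ≤ y.2) then x :: y :: ys else y :: heapPush x ys

-- the tuple (*item, idx) is the list `item ++ [idx]`; t[k] is t.getD k 0, exact wherever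
-- Python's t[k] exists — Pre_solution excludes exactly the inputs on which A's t[1]/t[2] raises
-- the inner `while items and health - items[0][DEBUFF] >= 100: heappush((-t[0], t[2]))`
def aAdvance (h : Int) : List (List Int) → List (Int × Int) → List (List Int) × List (Int × Int)
  | [], c => ([], c)
  | t :: rest, c =>
      if h - t.getD 1 0 ≥ 100 then aAdvance h rest (heapPush (-(t.getD 0 0), t.getD 2 0) c)
      else (t :: rest, c)

-- the `for health in healths:` loop (state: deque of items, heap, answer)
def aLoop : List Int → List (List Int) → List (Int × Int) → List Int → List Int
  | [], _, _, ans => ans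
  | h :: hs, q, c, ans =>
      let s := aAdvance h q c
      match s.2 with
      | [] => aLoop hs s.1 [] ans
      | m :: c' => aLoop hs s.1 c' (ans ++ [m.2])

def solution (healths : List Int) (items : List (List Int)) : List Int :=
  let hs := PySem.List.sorted healths (fun x => x) false
  let its0 := (PySem.List.enumerate items 1).map (fun p => p.2 ++ [p.1])
  let its := PySem.List.sorted its0 (fun t => t.getD 1 0) false
  PySem.List.sorted (aLoop hs its [] []) (fun x => x) false

-- ===== PORT B =====
-- `sum(1 for t in its if t[1] <= h - 100)`: a 0/1-sum is a countP (PYSEM: sum_map_ite_one_zero)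
def bCount (its : List (List Int)) (h : Int) : Nat :=
  its.countP (fun t => t.getD 1 0 ≤ h - 100)

-- the `for j in range(k)` best-position scan; `best = -1` is `none`
def bBestAux (its : List (List Int)) (used : List Bool) : List Nat → Option Nat → Option Nat
  | [], best => best
  | j :: js, best =>
      if used.getD j false then bBestAux its used js best
      else
        match best with
        | none => bBestAux its used js (some j)
        | some b =>
            if (its.getD j []).getD 0 0 > (its.getD b []).getD 0 0 ∨
               ((its.getD j []).getD 0 0 = (its.getD b []).getD 0 0 ∧
                (its.getD j []).getD 2 0 < (its.getD b []).getD 2 0)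
            then bBestAux its used js (some j) else bBestAux its used js (some b)

def bBest (its : List (List Int)) (used : List Bool) (k : Nat) : Option Nat :=
  bBestAux its used (List.range k) none

-- the `for k in counts:` loop (state: used-array, answer)
def bMain (its : List (List Int)) : List Nat → List Bool → List Int → List Int
  | [], _, ans => ans
  | k :: ks, used, ans =>
      match bBest its used k with
      | none => bMain its ks used ans
      | some b => bMain its ks (used.set b true) (ans ++ [(its.getD b []).getD 2 0])

def solution_alt (healths : List Int) (items : List (List Int)) : List Int :=
  let its := PySem.List.sorted ((PySem.List.enumerate items 1).map (fun p => p.2 ++ [p.1]))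
      (fun t => t.getD 1 0) false
  let counts := (PySem.List.sorted healths (fun x => x) false).map (fun h => bCount its h)
  PySem.List.sorted (bMain its counts (List.replicate its.length false) []) (fun x => x) false

-- ===== PRECONDITION & SPEC =====
-- Pre_ = exactly the inputs on which Python A returns: an empty entry raises IndexError in the
-- sort key, and a 1-field entry at 1-based position i (whose sort key becomes i) raises IndexError
-- at heappush as soon as some health satisfies health - i >= 100.
def Pre_solution (healths : List Int) (items : List (List Int)) : Prop :=
  (∀ it ∈ items, it ≠ []) ∧
  (∀ p ∈ PySem.List.enumerate items 1, p.2.length = 1 → ∀ h ∈ healths, h - p.1 < 100)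
instance (healths : List Int) (items : List (List Int)) : Decidable (Pre_solution healths items) := by unfold Pre_solution; infer_instance

def pvWitness_solution : List Int × List (List Int) := ([102, 150], [[10, 2], [3, 1]])

def Spec_solution (healths : List Int) (items : List (List Int)) (out : List Int) : Prop := out = solution_alt healths items
instance (healths : List Int) (items : List (List Int)) (out : List Int) : Decidable (Spec_solution healths items out) := by unfold Spec_solution; infer_instance

-- ===== CLAIM (what is proved, stated in full; the proofs are below) =====
def Claim_equal_solution : Prop := ∀ (healths : List Int) (items : List (List Int)), Dom_solution healths items → Pre_solution healths items → Spec_solution healths items (solution healths items)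

-- ===== LEMMAS AND PROOFS =====

-- lexicographic order on heap entries
def lexLe (a b : Int × Int) : Prop := a.1 < b.1 ∨ (a.1 = b.1 ∧ a.2 ≤ b.2)

-- the heap entry made from position j of the sorted item table
def entry (its : List (List Int)) (j : Nat) : Int × Int :=
  (-(its.getD j []).getD 0 0, (its.getD j []).getD 2 0)

-- unused positions among the first k
def unusedPrefix (used : List Bool) (k : Nat) : List Nat :=
  (List.range k).filter (fun j => !used.getD j false)

theorem lexLe_refl (a : Int × Int) : lexLe a a := by simp [lexLe]

theorem lexLe_antisymm {a b : Int × Int} (h1 : lexLe a b) (h2 : lexLe b a) : a = b := by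
  obtain ⟨x, y⟩ := a; obtain ⟨u, v⟩ := b
  unfold lexLe at h1 h2; simp_all; omega

theorem heapPush_perm (x : Int × Int) (l : List (Int × Int)) :
    (heapPush x l).Perm (x :: l) := by
  induction l with
  | nil => simp [heapPush]
  | cons y ys ih =>
      by_cases h : x.1 < y.1 ∨ (x.1 = y.1 ∧ x.2 ≤ y.2)
      · simp [heapPush, h]
      · simp only [heapPush, if_neg h]
        exact ((ih.cons y).trans (List.Perm.swap x y ys))

theorem heapPush_sorted {x : Int × Int} {l : List (Int × Int)}
    (hl : l.Pairwise lexLe) : (heapPush x l).Pairwise lexLe := by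
  induction l with
  | nil => simp [heapPush]
  | cons y ys ih =>
      rw [List.pairwise_cons] at hl
      by_cases h : x.1 < y.1 ∨ (x.1 = y.1 ∧ x.2 ≤ y.2)
      · simp only [heapPush, if_pos h]
        refine List.pairwise_cons.2 ⟨?_, List.pairwise_cons.2 hl⟩
        intro z hz
        rcases List.mem_cons.1 hz with hz | hz
        · subst hz; exact h
        · have h2 := hl.1 z hz
          unfold lexLe at h2 ⊢; omega
      · simp only [heapPush, if_neg h]
        refine List.pairwise_cons.2 ⟨?_, ih hl.2⟩
        intro z hz
        have hz' : z ∈ x :: ys := (heapPush_perm x ys).mem_iff.1 hz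
        rcases List.mem_cons.1 hz' with hz' | hz'
        · subst hz'; unfold lexLe; omega
        · exact hl.1 z hz'


-- key-sorted table: an element satisfies the eligibility bound iff its position is below the count
theorem count_true {its : List (List Int)}
    (hs : its.Pairwise (fun a b => a.getD 1 0 ≤ b.getD 1 0)) (c : Int) :
    ∀ j, j < its.countP (fun t => t.getD 1 0 ≤ c) → (its.getD j []).getD 1 0 ≤ c := by
  induction its with
  | nil => simp
  | cons t rest ih =>
      rw [List.pairwise_cons] at hs
      intro j hj
      by_cases hp : t.getD 1 0 ≤ c
      · rw [List.countP_cons_of_pos (p := fun t : List Int => decide (t.getD 1 0 ≤ c)) (by simpa using hp)] at hj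
        cases j with
        | zero => simpa using hp
        | succ j => exact ih hs.2 j (by omega)
      · have hz : rest.countP (fun t => t.getD 1 0 ≤ c) = 0 := by
          rw [List.countP_eq_zero]
          intro x hx
          simpa using fun hxc => hp (le_trans (hs.1 x hx) hxc)
        rw [List.countP_cons_of_neg (p := fun t : List Int => decide (t.getD 1 0 ≤ c)) (by simpa using hp), hz] at hj
        omega

theorem count_false {its : List (List Int)}
    (hs : its.Pairwise (fun a b => a.getD 1 0 ≤ b.getD 1 0)) (c : Int)
    (hk : its.countP (fun t => t.getD 1 0 ≤ c) < its.length) :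
    ¬ (its.getD (its.countP (fun t => t.getD 1 0 ≤ c)) []).getD 1 0 ≤ c := by
  induction its with
  | nil => simp at hk
  | cons t rest ih =>
      rw [List.pairwise_cons] at hs
      by_cases hp : t.getD 1 0 ≤ c
      · rw [List.countP_cons_of_pos (p := fun t : List Int => decide (t.getD 1 0 ≤ c)) (by simpa using hp)] at hk ⊢
        simpa using ih hs.2 (by simpa using hk)
      · have hz : rest.countP (fun t => t.getD 1 0 ≤ c) = 0 := by
          rw [List.countP_eq_zero]
          intro x hx
          simpa using fun hxc => hp (le_trans (hs.1 x hx) hxc)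
        rw [List.countP_cons_of_neg (p := fun t : List Int => decide (t.getD 1 0 ≤ c)) (by simpa using hp), hz]
        simpa using hp

theorem getD_at {α : Type} (l : List α) (d : α) {i : Nat} (h : i < l.length) :
    l.getD i d = l[i] := by
  simp [List.getD, List.getElem?_eq_getElem h]

-- the pushes A performs while draining the deque from position p to position p+n
def pushRange (its : List (List Int)) (p n : Nat) (c : List (Int × Int)) : List (Int × Int) :=
  (List.range' p n).foldl (fun c j => heapPush (entry its j) c) c

theorem advance_eq {its : List (List Int)} {h : Int} :
    ∀ (n p : Nat) (c : List (Int × Int)), p + n ≤ its.length →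
    (∀ j, p ≤ j → j < p + n → (its.getD j []).getD 1 0 ≤ h - 100) →
    (p + n < its.length → ¬ (its.getD (p + n) []).getD 1 0 ≤ h - 100) →
    aAdvance h (its.drop p) c = (its.drop (p + n), pushRange its p n c) := by
  intro n
  induction n with
  | zero =>
      intro p c _ _ hfalse
      simp only [Nat.add_zero] at hfalse ⊢
      by_cases hp : p < its.length
      · rw [List.drop_eq_getElem_cons hp]
        have hne : ¬ h - (its[p]'hp).getD 1 0 ≥ 100 := by
          have := hfalse hp
          rw [getD_at _ _ hp] at this
          omega
        simp only [aAdvance, if_neg hne, pushRange, List.range'_zero, List.foldl_nil]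
      · rw [List.drop_eq_nil_of_le (by omega)]
        simp [aAdvance, pushRange]
  | succ n ih =>
      intro p c hlen htrue hfalse
      have hp : p < its.length := by omega
      rw [List.drop_eq_getElem_cons hp]
      have hyes : h - (its[p]'hp).getD 1 0 ≥ 100 := by
        have := htrue p le_rfl (by omega)
        rw [getD_at _ _ hp] at this
        omega
      simp only [aAdvance, if_pos hyes]
      have hrec := ih (p + 1) (heapPush (-(its[p]'hp).getD 0 0, (its[p]'hp).getD 2 0) c)
        (by omega) (fun j h1 h2 => htrue j (by omega) (by omega))
        (by have harr : p + 1 + n = p + (n + 1) := by omega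
            rw [harr]; exact hfalse)
      rw [hrec]
      have harr : p + 1 + n = p + (n + 1) := by omega
      rw [harr]
      congr 1
      simp only [pushRange, List.range'_succ, List.foldl_cons]
      congr 2
      simp [entry, List.getD, List.getElem?_eq_getElem hp]

theorem pushRange_perm (its : List (List Int)) :
    ∀ (n p : Nat) (c : List (Int × Int)),
    (pushRange its p n c).Perm (c ++ (List.range' p n).map (entry its)) := by
  intro n
  induction n with
  | zero => intro p c; simp [pushRange]
  | succ n ih =>
      intro p c
      simp only [pushRange, List.range'_succ, List.foldl_cons, List.map_cons]
      have h1 := ih (p + 1) (heapPush (entry its p) c)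
      refine h1.trans ?_
      have h2 : (heapPush (entry its p) c).Perm (entry its p :: c) := heapPush_perm _ _
      refine (h2.append_right _).trans ?_
      exact (List.perm_middle.symm : (entry its p :: (c ++ _)).Perm _)

theorem pushRange_pairwise (its : List (List Int)) :
    ∀ (n p : Nat) (c : List (Int × Int)), c.Pairwise lexLe →
    (pushRange its p n c).Pairwise lexLe := by
  intro n
  induction n with
  | zero => intro p c hc; simpa [pushRange] using hc
  | succ n ih =>
      intro p c hc
      simp only [pushRange, List.range'_succ, List.foldl_cons]
      exact ih (p + 1) _ (heapPush_sorted hc)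

theorem mem_unusedPrefix {used : List Bool} {k j : Nat} :
    j ∈ unusedPrefix used k ↔ j < k ∧ used.getD j false = false := by
  simp [unusedPrefix, List.mem_filter, List.mem_range]

theorem unusedPrefix_extend {used : List Bool} {p k : Nat} (hpk : p ≤ k)
    (hun : ∀ j, p ≤ j → j < k → used.getD j false = false) :
    unusedPrefix used k = unusedPrefix used p ++ List.range' p (k - p) := by
  have hr : List.range k = List.range p ++ List.range' p (k - p) := by
    have h2 := @List.range'_append 0 p (k - p) 1
    simp only [Nat.zero_add, Nat.one_mul] at h2
    rw [show p + (k - p) = k from by omega] at h2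
    rw [List.range_eq_range', List.range_eq_range', ← h2]
  unfold unusedPrefix
  rw [hr, List.filter_append]
  congr 1
  rw [List.filter_eq_self]
  intro j hj
  have hj' := List.mem_range'.1 hj
  simp only [Bool.not_eq_eq_eq_not, Bool.not_true]
  rw [hun j (by omega) (by omega)]

theorem lexLe_trans {a b c : Int × Int} (h1 : lexLe a b) (h2 : lexLe b c) : lexLe a c := by
  obtain ⟨x, y⟩ := a; obtain ⟨u, v⟩ := b; obtain ⟨s, t⟩ := c
  unfold lexLe at h1 h2 ⊢; simp_all; omega

-- the scan's replacement test, against the heap order on entries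
theorem scanCond_true {its : List (List Int)} {j b : Nat}
    (h : (its.getD j []).getD 0 0 > (its.getD b []).getD 0 0 ∨
         ((its.getD j []).getD 0 0 = (its.getD b []).getD 0 0 ∧
          (its.getD j []).getD 2 0 < (its.getD b []).getD 2 0)) :
    lexLe (entry its j) (entry its b) := by
  unfold entry lexLe; simp only []; omega

theorem scanCond_false {its : List (List Int)} {j b : Nat}
    (h : ¬((its.getD j []).getD 0 0 > (its.getD b []).getD 0 0 ∨
         ((its.getD j []).getD 0 0 = (its.getD b []).getD 0 0 ∧
          (its.getD j []).getD 2 0 < (its.getD b []).getD 2 0))) :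
    lexLe (entry its b) (entry its j) := by
  unfold entry lexLe; simp only []; omega

-- the linear scan returns the first position whose heap entry is lexicographically minimal
theorem bBestAux_spec (its : List (List Int)) (used : List Bool) :
    ∀ (L : List Nat) (best : Option Nat),
      (bBestAux its used L best = none ↔
        (best = none ∧ L.filter (fun j => !used.getD j false) = [])) ∧
      (∀ b, bBestAux its used L best = some b →
        (best = some b ∨ b ∈ L.filter (fun j => !used.getD j false)) ∧
        (∀ a, best = some a → lexLe (entry its b) (entry its a)) ∧
        (∀ j ∈ L.filter (fun j => !used.getD j false),
          lexLe (entry its b) (entry its j))) := by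
  intro L
  induction L with
  | nil =>
      intro best
      constructor
      · simp [bBestAux]
      · intro b hb
        simp only [bBestAux] at hb
        subst hb
        exact ⟨Or.inl rfl, by intro a ha; cases Option.some.inj ha; exact lexLe_refl _, by simp⟩
  | cons j js ih =>
      intro best
      by_cases hu : used.getD j false
      · have hf : (j :: js).filter (fun j => !used.getD j false) =
            js.filter (fun j => !used.getD j false) := by
          have h0 : (!used.getD j false) = false := by rw [hu]; rfl
          rw [List.filter_cons, h0]; simp
        have hb : ∀ best, bBestAux its used (j :: js) best = bBestAux its used js best := by
          intro best; simp only [bBestAux, if_pos hu]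
        rw [hf, hb]
        exact ih best
      · have hf : (j :: js).filter (fun j => !used.getD j false) =
            j :: js.filter (fun j => !used.getD j false) := by
          have hu2 : used.getD j false = false := Bool.eq_false_iff.mpr hu
          have h0 : (!used.getD j false) = true := by rw [hu2]; rfl
          rw [List.filter_cons, h0]; simp
        rw [hf]
        cases best with
        | none =>
            have hb : bBestAux its used (j :: js) none = bBestAux its used js (some j) := by
              simp only [bBestAux, if_neg hu]
            rw [hb]
            obtain ⟨ih1, ih2⟩ := ih (some j)
            constructor
            · rw [ih1]; simp
            · intro b hbb
              obtain ⟨m1, m2, m3⟩ := ih2 b hbb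
              refine ⟨?_, by simp, ?_⟩
              · rcases m1 with m1 | m1
                · cases Option.some.inj m1; exact Or.inr (List.mem_cons_self ..)
                · exact Or.inr (List.mem_cons_of_mem _ m1)
              · intro x hx
                rcases List.mem_cons.1 hx with hx | hx
                · subst hx; exact m2 _ rfl
                · exact m3 x hx
        | some a0 =>
            by_cases hc : (its.getD j []).getD 0 0 > (its.getD a0 []).getD 0 0 ∨
               ((its.getD j []).getD 0 0 = (its.getD a0 []).getD 0 0 ∧
                (its.getD j []).getD 2 0 < (its.getD a0 []).getD 2 0)
            · have hb : bBestAux its used (j :: js) (some a0) = bBestAux its used js (some j) := by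
                simp only [bBestAux, if_neg hu, if_pos hc]
              rw [hb]
              obtain ⟨ih1, ih2⟩ := ih (some j)
              constructor
              · rw [ih1]; simp
              · intro b hbb
                obtain ⟨m1, m2, m3⟩ := ih2 b hbb
                refine ⟨?_, ?_, ?_⟩
                · rcases m1 with m1 | m1
                  · cases Option.some.inj m1; exact Or.inr (List.mem_cons_self ..)
                  · exact Or.inr (List.mem_cons_of_mem _ m1)
                · intro a ha
                  cases Option.some.inj ha
                  exact lexLe_trans (m2 j rfl) (scanCond_true hc)
                · intro x hx
                  rcases List.mem_cons.1 hx with hx | hx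
                  · subst hx; exact m2 _ rfl
                  · exact m3 x hx
            · have hb : bBestAux its used (j :: js) (some a0) = bBestAux its used js (some a0) := by
                simp only [bBestAux, if_neg hu, if_neg hc]
              rw [hb]
              obtain ⟨ih1, ih2⟩ := ih (some a0)
              constructor
              · rw [ih1]; simp
              · intro b hbb
                obtain ⟨m1, m2, m3⟩ := ih2 b hbb
                refine ⟨?_, m2, ?_⟩
                · rcases m1 with m1 | m1
                  · exact Or.inl m1
                  · exact Or.inr (List.mem_cons_of_mem _ m1)
                · intro x hx
                  rcases List.mem_cons.1 hx with hx | hx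
                  · subst hx; exact lexLe_trans (m2 a0 rfl) (scanCond_false hc)
                  · exact m3 x hx

theorem bBest_none {its : List (List Int)} {used : List Bool} {k : Nat} :
    bBest its used k = none ↔ unusedPrefix used k = [] := by
  have := (bBestAux_spec its used (List.range k) none).1
  simpa [bBest, unusedPrefix] using this

theorem bBest_some {its : List (List Int)} {used : List Bool} {k b : Nat}
    (hb : bBest its used k = some b) :
    b ∈ unusedPrefix used k ∧ ∀ j ∈ unusedPrefix used k, lexLe (entry its b) (entry its j) := by
  have h := (bBestAux_spec its used (List.range k) none).2 b hb
  refine ⟨?_, h.2.2⟩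
  rcases h.1 with h1 | h1
  · exact absurd h1.symm (by simp)
  · exact h1

theorem map_erase_perm {f : Nat → Int × Int} {S : List Nat} {b : Nat} (hb : b ∈ S) :
    ((S.map f).erase (f b)).Perm ((S.erase b).map f) := by
  induction S with
  | nil => simp at hb
  | cons s rest ih =>
      by_cases hsb : s = b
      · subst hsb
        rw [List.map_cons, List.erase_cons_head, List.erase_cons_head]
      · have hb2 : b ∈ rest := by
          rcases List.mem_cons.1 hb with h | h
          · exact absurd h.symm hsb
          · exact h
        rw [List.erase_cons_tail (by simpa using hsb), List.map_cons, List.map_cons]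
        by_cases hfs : f s = f b
        · rw [← hfs, List.erase_cons_head, hfs]
          exact (List.perm_cons_erase hb2).map f
        · rw [List.erase_cons_tail (by simpa using hfs)]
          exact (ih hb2).cons (f s)

theorem getD_set_self {used : List Bool} {b : Nat} (hb : b < used.length) :
    (used.set b true).getD b false = true := by
  simp [List.getD, List.getElem?_set_self hb]

theorem getD_set_ne {used : List Bool} {b j : Nat} (h : j ≠ b) :
    (used.set b true).getD j false = used.getD j false := by
  simp [List.getD, List.getElem?_set_ne (fun hh => h hh.symm)]

theorem filter_set_erase {used : List Bool} {b : Nat} (hb : b < used.length) :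
    ∀ L : List Nat, L.Nodup →
      L.filter (fun j => !(used.set b true).getD j false) =
      (L.filter (fun j => !used.getD j false)).erase b := by
  intro L
  induction L with
  | nil => simp
  | cons s rest ih =>
      intro hnd
      rw [List.nodup_cons] at hnd
      have hrest0 := ih hnd.2
      by_cases hsb : s = b
      · subst hsb
        have h1 : (!(used.set s true).getD s false) = false := by rw [getD_set_self hb]; rfl
        rw [List.filter_cons, h1, if_neg (by simp)]
        have hrest : rest.filter (fun j => !(used.set s true).getD j false) =
            rest.filter (fun j => !used.getD j false) :=
          List.filter_congr (fun j hj => by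
            rw [getD_set_ne (fun h : j = s => hnd.1 (by rw [← h]; exact hj))])
        rw [hrest]
        by_cases hu : used.getD s false
        · have h2 : (!used.getD s false) = false := by rw [hu]; rfl
          rw [List.filter_cons, h2, if_neg (by simp)]
          rw [List.erase_of_not_mem (fun hm => hnd.1 (List.mem_filter.1 hm).1)]
        · have h2 : (!used.getD s false) = true := by
            rw [Bool.eq_false_iff.mpr hu]; rfl
          rw [List.filter_cons, h2, if_pos rfl, List.erase_cons_head]
      · rw [List.filter_cons, List.filter_cons, getD_set_ne hsb]
        by_cases hu : used.getD s false
        · have h2 : (!used.getD s false) = false := by rw [hu]; rfl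
          rw [h2, if_neg (by simp), if_neg (by simp), hrest0]
        · have h2 : (!used.getD s false) = true := by
            rw [Bool.eq_false_iff.mpr hu]; rfl
          rw [h2, if_pos rfl, if_pos rfl,
            List.erase_cons_tail (by simpa using hsb), hrest0]

theorem unusedPrefix_set {used : List Bool} {b k : Nat} (hb : b < used.length) :
    unusedPrefix (used.set b true) k = (unusedPrefix used k).erase b := by
  unfold unusedPrefix
  exact filter_set_erase hb (List.range k) (List.nodup_range)

-- the main loop invariant: A's deque is the table from position p on, A's heap is a sorted
-- copy of the unused eligible prefix, B's used-array marks exactly the selected positions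
theorem loop_eq {its : List (List Int)}
    (hsorted : its.Pairwise (fun a b => a.getD 1 0 ≤ b.getD 1 0)) :
    ∀ (hs : List Int) (p : Nat) (ca : List (Int × Int)) (used : List Bool) (ans : List Int),
    hs.Pairwise (· ≤ ·) →
    p ≤ its.length →
    used.length = its.length →
    (∀ h ∈ hs, ∀ j, j < p → (its.getD j []).getD 1 0 ≤ h - 100) →
    (∀ j, used.getD j false = true → j < p) →
    ca.Perm ((unusedPrefix used p).map (entry its)) →
    ca.Pairwise lexLe →
    aLoop hs (its.drop p) ca ans = bMain its (hs.map (bCount its)) used ans := by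
  intro hs
  induction hs with
  | nil => intro p ca used ans _ _ _ _ _ _ _; rfl
  | cons h hs ih =>
      intro p ca used ans hps hp hlen helig hused hperm hsort
      rw [List.pairwise_cons] at hps
      have hkle : bCount its h ≤ its.length := List.countP_le_length
      have hpk : p ≤ bCount its h := by
        by_contra hlt
        rw [Nat.not_le] at hlt
        exact count_false hsorted (h - 100) (lt_of_lt_of_le hlt hp)
          (helig h (List.mem_cons_self ..) _ hlt)
      have htrue : ∀ j, p ≤ j → j < bCount its h → (its.getD j []).getD 1 0 ≤ h - 100 :=
        fun j _ hj => count_true hsorted (h - 100) j hj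
      have hadv := advance_eq (h := h) (bCount its h - p) p ca (by omega)
        (fun j h1 h2 => htrue j h1 (by omega))
        (by rw [show p + (bCount its h - p) = bCount its h from by omega]
            exact count_false hsorted (h - 100))
      rw [show p + (bCount its h - p) = bCount its h from by omega] at hadv
      have hunpk : ∀ j, p ≤ j → j < bCount its h → used.getD j false = false := by
        intro j h1 h2
        cases hval : used.getD j false with
        | false => rfl
        | true => exact absurd (hused j hval) (by omega)
      have hext := unusedPrefix_extend hpk hunpk
      have hca' : (pushRange its p (bCount its h - p) ca).Perm
          ((unusedPrefix used (bCount its h)).map (entry its)) := by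
        refine (pushRange_perm its (bCount its h - p) p ca).trans ?_
        rw [hext, List.map_append]
        exact hperm.append_right _
      have hsort' := pushRange_pairwise its (bCount its h - p) p ca hsort
      simp only [aLoop, List.map_cons, bMain]
      rw [hadv]
      have hnext : ∀ h' ∈ hs, ∀ j, j < bCount its h → (its.getD j []).getD 1 0 ≤ h' - 100 := by
        intro h' hh' j hj
        have h1 := count_true hsorted (h - 100) j hj
        have h2 := hps.1 h' hh'
        omega
      cases hm : pushRange its p (bCount its h - p) ca with
      | nil =>
          rw [hm] at hca'
          have hup : unusedPrefix used (bCount its h) = [] := by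
            exact List.map_eq_nil_iff.1 hca'.symm.eq_nil
          rw [bBest_none.2 hup]
          exact ih (bCount its h) [] used ans hps.2 hkle hlen hnext
            (fun j hj => lt_of_lt_of_le (hused j hj) hpk)
            (by rw [hup]; simp) (by simp)
      | cons m rest =>
          rw [hm] at hca' hsort'
          have hne : unusedPrefix used (bCount its h) ≠ [] := by
            intro hnil
            rw [hnil] at hca'
            have : (m :: rest) = [] := by simpa using hca'.eq_nil
            cases this
          cases hbb : bBest its used (bCount its h) with
          | none => exact absurd (bBest_none.1 hbb) hne
          | some b =>
              obtain ⟨hbmem, hbmin⟩ := bBest_some hbb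
              have hbk : b < bCount its h := (mem_unusedPrefix.1 hbmem).1
              have hmb : m = entry its b := by
                have hin : entry its b ∈ m :: rest :=
                  hca'.mem_iff.2 (List.mem_map_of_mem hbmem)
                have h1 : lexLe m (entry its b) := by
                  rcases List.mem_cons.1 hin with hh | hh
                  · rw [hh]; exact lexLe_refl _
                  · exact (List.pairwise_cons.1 hsort').1 _ hh
                have h2 : lexLe (entry its b) m := by
                  obtain ⟨j0, hj0, hj0m⟩ := List.mem_map.1
                    (hca'.mem_iff.1 (List.mem_cons_self ..))
                  rw [← hj0m]
                  exact hbmin j0 hj0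
                exact (lexLe_antisymm h2 h1).symm
              have hblen : b < used.length := by omega
              have hrest : rest.Perm
                  ((unusedPrefix (used.set b true) (bCount its h)).map (entry its)) := by
                rw [unusedPrefix_set hblen]
                have h1 := hca'.erase m
                rw [List.erase_cons_head] at h1
                rw [hmb] at h1
                exact h1.trans (map_erase_perm hbmem)
              have hval : (its.getD b []).getD 2 0 = m.2 := by rw [hmb]; rfl
              show aLoop hs (List.drop (bCount its h) its) rest (ans ++ [m.2]) =
                bMain its (List.map (bCount its) hs) (used.set b true)
                  (ans ++ [(its.getD b []).getD 2 0])
              rw [hval]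
              exact ih (bCount its h) rest (used.set b true) (ans ++ [m.2]) hps.2 hkle
                (by rw [List.length_set]; exact hlen) hnext
                (by intro j hj
                    by_cases hjb : j = b
                    · omega
                    · rw [getD_set_ne hjb] at hj
                      exact lt_of_lt_of_le (hused j hj) hpk)
                hrest (List.pairwise_cons.1 hsort').2

-- ===== VERDICT (by name: the statement is the Claim_ definition above) =====
theorem solution_spec : Claim_equal_solution := by
  intro healths items _ _
  unfold Spec_solution solution solution_alt
  have h := loop_eq (its := PySem.List.sorted ((PySem.List.enumerate items 1).map (fun p => p.2 ++ [p.1])) (fun t => t.getD 1 0) false)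
    (PySem.List.sorted_pairwise ..)
    (PySem.List.sorted healths (fun x => x) false) 0 []
    (List.replicate (PySem.List.sorted ((PySem.List.enumerate items 1).map (fun p => p.2 ++ [p.1])) (fun t => t.getD 1 0) false).length false) []
    (PySem.List.sorted_pairwise ..)
    (Nat.zero_le _) (List.length_replicate ..)
    (by intro h hh j hj; omega)
    (by intro j hj; simp [List.getD, List.getElem?_replicate] at hj; split at hj <;> simp_all)
    (by simp [unusedPrefix])
    (by simp)
  simpa using congrArg (fun l => PySem.List.sorted l (fun x => x) false) h
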